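-- pv_equiv track=rewrite | github.com/psarmento/ANIPAR | ispec_ParameterFinder.py | MH_finder
-- ===== SOURCE A (Python) =====
-- def MH_finder(star):
--     under_counter = 0
--     point_counter = 0
--     t = ''
--     for c in star:
--         if c == '_':
--             under_counter += 1
--         elif under_counter == 3 and point_counter<3:
--             if c == '.':
--                 point_counter += 1
--             if point_counter < 2:
--                 t += c
--     return t
-- ===== SOURCE B (Python) =====
-- def MH_finder(star):
--     parts = star.split('_')
--     if len(parts) < 4:
--         return ''
--     return '.'.join(parts[3].split('.')[:2])
-- ===== Notes on version B (the rewrite author's own statement) =====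
-- stated objective: faster
-- what changed: Replaced the char-by-char underscore/dot counting state machine with split-based parsing: take the fourth underscore-separated field and keep everything before its second dot by splitting and rejoining.
import Mathlib
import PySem

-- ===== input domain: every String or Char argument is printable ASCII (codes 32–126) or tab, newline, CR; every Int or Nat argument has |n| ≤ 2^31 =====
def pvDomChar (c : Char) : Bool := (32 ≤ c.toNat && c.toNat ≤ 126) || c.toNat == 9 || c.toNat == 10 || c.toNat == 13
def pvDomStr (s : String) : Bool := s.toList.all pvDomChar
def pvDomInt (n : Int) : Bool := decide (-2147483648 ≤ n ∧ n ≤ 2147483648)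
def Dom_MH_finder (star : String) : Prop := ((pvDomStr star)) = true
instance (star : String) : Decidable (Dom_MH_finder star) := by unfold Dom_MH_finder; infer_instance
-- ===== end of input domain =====

-- B replaces A's char-by-char underscore/dot counting state machine with split-based parsing (simpler).

-- ===== PORT A =====
-- literal port of A's for-loop: state (under_counter, point_counter, t), branches in source order
def MH_finder.go : Int → Int → List Char → List Char → List Char
  | _, _, t, [] => t
  | u, p, t, c :: cs =>
    if c = '_' then MH_finder.go (u + 1) p t cs
    else if u = 3 ∧ p < 3 then
      let p' := if c = '.' then p + 1 else p
      MH_finder.go u p' (if p' < 2 then t ++ [c] else t) cs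
    else MH_finder.go u p t cs

def MH_finder (star : String) : String :=
  String.ofList (MH_finder.go 0 0 [] star.toList)

-- ===== PORT B =====
-- parts = star.split('_'); if len(parts) < 4: return ''; return '.'.join(parts[3].split('.')[:2])
def MH_finder_alt (star : String) : String :=
  let parts := star.toList.splitOn '_'
  if parts.length < 4 then ""
  else String.ofList (PySem.Chars.join ['.'] (((parts.getD 3 []).splitOn '.').take 2))

-- ===== PRECONDITION & SPEC =====
def Spec_MH_finder (star : String) (out : String) : Prop := out = MH_finder_alt star
instance (star : String) (out : String) : Decidable (Spec_MH_finder star out) := by unfold Spec_MH_finder; infer_instance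

-- ===== CLAIM (what is proved, stated in full; the proofs are below) =====
def Claim_equal_MH_finder : Prop := ∀ (star : String), Dom_MH_finder star → Spec_MH_finder star (MH_finder star)

-- ===== LEMMAS AND PROOFS =====

-- the field the dots-phase of A produces, and B's dots computation, as list functions
def pvDots (field : List Char) : List Char :=
  PySem.Chars.join ['.'] ((field.splitOn '.').take 2)

-- B's core, with k underscores already consumed (k ≤ 3)
def pvAltCore (k : Nat) (cs : List Char) : List Char :=
  let parts := cs.splitOn '_'
  if parts.length < 4 - k then []
  else pvDots (parts.getD (3 - k) [])

theorem pv_go_append (cs : List Char) : ∀ (u p : Int) (t : List Char),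
    MH_finder.go u p t cs = t ++ MH_finder.go u p [] cs := by
  induction cs with
  | nil => intro u p t; simp [MH_finder.go]
  | cons c cs ih =>
    intro u p t
    by_cases hc : c = '_'
    · have hstep : ∀ t', MH_finder.go u p t' (c :: cs) = MH_finder.go (u+1) p t' cs :=
        fun t' => by simp [MH_finder.go, hc]
      rw [hstep t, hstep [], ih]
    · by_cases h3 : u = 3 ∧ p < 3
      · by_cases hd : c = '.'
        · by_cases hp : p + 1 < 2
          · have hstep : ∀ t', MH_finder.go u p t' (c :: cs) = MH_finder.go u (p+1) (t' ++ [c]) cs :=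
              fun t' => by simp [MH_finder.go, hc, h3, hd, hp]
            rw [hstep t, hstep [], ih u (p+1) (t ++ [c]), ih u (p+1) ([] ++ [c])]
            simp
          · have hstep : ∀ t', MH_finder.go u p t' (c :: cs) = MH_finder.go u (p+1) t' cs :=
              fun t' => by simp [MH_finder.go, hc, h3, hd, hp]
            rw [hstep t, hstep [], ih]
        · by_cases hp : p < 2
          · have hstep : ∀ t', MH_finder.go u p t' (c :: cs) = MH_finder.go u p (t' ++ [c]) cs :=
              fun t' => by simp [MH_finder.go, hc, h3, hd, hp]
            rw [hstep t, hstep [], ih u p (t ++ [c]), ih u p ([] ++ [c])]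
            simp
          · have hstep : ∀ t', MH_finder.go u p t' (c :: cs) = MH_finder.go u p t' cs :=
              fun t' => by simp [MH_finder.go, hc, h3, hd, hp]
            rw [hstep t, hstep [], ih]
      · have hstep : ∀ t', MH_finder.go u p t' (c :: cs) = MH_finder.go u p t' cs :=
          fun t' => by simp [MH_finder.go, hc, h3]
        rw [hstep t, hstep [], ih]

theorem pv_go_gt3 (cs : List Char) : ∀ (u p : Int), 3 < u →
    MH_finder.go u p [] cs = [] := by
  induction cs with
  | nil => intro u p _; simp [MH_finder.go]
  | cons c cs ih =>
    intro u p hu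
    by_cases hc : c = '_'
    · simp [MH_finder.go, hc]; exact ih _ _ (by omega)
    · have h3 : ¬ (u = 3 ∧ p < 3) := by omega
      simp [MH_finder.go, hc, h3]; exact ih _ _ hu

theorem pv_go_p2 (cs : List Char) : ∀ (p : Int), 2 ≤ p →
    MH_finder.go 3 p [] cs = [] := by
  induction cs with
  | nil => intro p _; simp [MH_finder.go]
  | cons c cs ih =>
    intro p hp
    by_cases hc : c = '_'
    · simp only [show MH_finder.go 3 p [] (c :: cs) = MH_finder.go 4 p [] cs from by
        simp [MH_finder.go, hc]]
      exact pv_go_gt3 cs 4 p (by omega)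
    · by_cases hp3 : p < 3
      · by_cases hd : c = '.'
        · simp only [show MH_finder.go 3 p [] (c :: cs) = MH_finder.go 3 (p+1) [] cs from by
            simp [MH_finder.go, hc, hd, hp3, show ¬ (p + 1 < 2) by omega]]
          exact ih _ (by omega)
        · simp only [show MH_finder.go 3 p [] (c :: cs) = MH_finder.go 3 p [] cs from by
            simp [MH_finder.go, hc, hd, hp3, show ¬ (p < 2) by omega]]
          exact ih _ hp
      · simp only [show MH_finder.go 3 p [] (c :: cs) = MH_finder.go 3 p [] cs from by
          simp [MH_finder.go, hc, hp3]]
        exact ih _ hp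

theorem pv_go31 (cs : List Char) :
    MH_finder.go 3 1 [] cs = cs.takeWhile (fun c => !(c == '.' || c == '_')) := by
  induction cs with
  | nil => simp [MH_finder.go]
  | cons c cs ih =>
    by_cases hc : c = '_'
    · rw [show MH_finder.go 3 1 [] (c :: cs) = MH_finder.go 4 1 [] cs from by
        simp [MH_finder.go, hc], pv_go_gt3 cs 4 1 (by omega)]
      simp [List.takeWhile_cons, hc]
    · by_cases hd : c = '.'
      · rw [show MH_finder.go 3 1 [] (c :: cs) = MH_finder.go 3 2 [] cs from by
          simp [MH_finder.go, hc, hd], pv_go_p2 cs 2 (by omega)]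
        simp [List.takeWhile_cons, hd]
      · rw [show MH_finder.go 3 1 [] (c :: cs) = MH_finder.go 3 1 [c] cs from by
          simp [MH_finder.go, hc, hd], pv_go_append, ih]
        simp [List.takeWhile_cons, hc, hd]

theorem pv_head_splitOn (a : Char) (cs : List Char) :
    ((cs.splitOn a).getD 0 []) = cs.takeWhile (fun c => !(c == a)) := by
  induction cs with
  | nil => simp [List.splitOn, List.splitOnP_nil]
  | cons c cs ih =>
    by_cases hc : c = a
    · simp [List.splitOn, List.splitOnP_cons, hc]
    · have hne := List.splitOnP_ne_nil (fun x => x == a) cs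
      rw [List.takeWhile_cons]
      cases h : cs.splitOnP (fun x => x == a) with
      | nil => exact absurd h hne
      | cons hd tl =>
        simp [List.splitOn, List.splitOnP_cons, hc, h] at ih ⊢
        exact ih

theorem pv_splitOn_length_pos (a : Char) (cs : List Char) :
    0 < (cs.splitOn a).length := by
  have := List.splitOnP_ne_nil (fun x => x == a) cs
  cases h : cs.splitOn a with
  | nil => exact absurd h this
  | cons _ _ => simp

theorem pv_dots_nil : pvDots [] = [] := by
  simp [pvDots, List.splitOn, List.splitOnP_nil, PySem.Chars.join, List.intercalate]

theorem pv_join_cons (sep : List Char) (c : Char) (h : List Char) (l : List (List Char)) :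
    PySem.Chars.join sep ((c :: h) :: l) = c :: PySem.Chars.join sep (h :: l) := by
  cases l <;> simp [PySem.Chars.join, List.intercalate]

theorem pv_go30 (cs : List Char) :
    MH_finder.go 3 0 [] cs = pvDots (cs.takeWhile (fun c => !(c == '_'))) := by
  induction cs with
  | nil => simp [MH_finder.go, pv_dots_nil]
  | cons c cs ih =>
    by_cases hc : c = '_'
    · rw [show MH_finder.go 3 0 [] (c :: cs) = MH_finder.go 4 0 [] cs from by
        simp [MH_finder.go, hc], pv_go_gt3 cs 4 0 (by omega)]
      simp [List.takeWhile_cons, hc, pv_dots_nil]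
    · by_cases hd : c = '.'
      · rw [show MH_finder.go 3 0 [] (c :: cs) = MH_finder.go 3 1 [c] cs from by
          simp [MH_finder.go, hc, hd], pv_go_append, pv_go31,
          List.takeWhile_cons]
        simp only [hd, show (!('.':Char) == '_') = true from by decide, if_pos]
        have hne := pv_splitOn_length_pos '.' (cs.takeWhile (fun c => !(c == '_')))
        cases h : (cs.takeWhile (fun c => !(c == '_'))).splitOn '.' with
        | nil => rw [h] at hne; simp at hne
        | cons hd0 tl =>
          have hhd : hd0 = (cs.takeWhile (fun c => !(c == '_'))).takeWhile (fun c => !(c == '.')) := by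
            have := pv_head_splitOn '.' (cs.takeWhile (fun c => !(c == '_')))
            rw [h] at this; simpa using this
          simp only [List.splitOn] at h
          simp only [pvDots, PySem.Chars.join, List.intercalate, List.splitOn, List.splitOnP_cons,
            show (('.':Char) == '.') = true from by decide, if_pos, List.take_succ_cons]
          rw [h]
          simp [List.intersperse, hhd, List.takeWhile_takeWhile]
          congr 1
      · rw [show MH_finder.go 3 0 [] (c :: cs) = MH_finder.go 3 0 [c] cs from by
          simp [MH_finder.go, hc, hd], pv_go_append, ih, List.takeWhile_cons]
        simp only [List.takeWhile_cons, show (!c == '_') = true from by simp [hc], if_pos]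
        have hne := pv_splitOn_length_pos '.' (cs.takeWhile (fun c => !(c == '_')))
        cases h : (cs.takeWhile (fun c => !(c == '_'))).splitOn '.' with
        | nil => rw [h] at hne; simp at hne
        | cons hd0 tl =>
          simp only [List.splitOn] at h
          simp only [pvDots, List.splitOn, List.splitOnP_cons, h, beq_iff_eq, hd, if_false,
            List.modifyHead, List.take]
          cases tl <;>
            simp [List.take, pv_join_cons, hd, PySem.Chars.join, List.intercalate, List.intersperse]

theorem pv_altCore3 (cs : List Char) : pvAltCore 3 cs = MH_finder.go 3 0 [] cs := by
  have hlen := pv_splitOn_length_pos '_' cs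
  simp only [pvAltCore]
  rw [if_neg (by omega), pv_go30, pv_head_splitOn]

theorem pv_main (cs : List Char) : ∀ (k : Nat), k ≤ 3 →
    MH_finder.go (k : Int) 0 [] cs = pvAltCore k cs := by
  induction cs with
  | nil =>
    intro k hk
    simp only [MH_finder.go, pvAltCore, List.splitOn, List.splitOnP_nil]
    interval_cases k <;> simp [pv_dots_nil]
  | cons c cs ih =>
    intro k hk
    by_cases hk3 : k = 3
    · subst hk3
      rw [show (((3:Nat)):Int) = (3:Int) from by norm_num, ← pv_altCore3]
    · have hk2 : k ≤ 2 := by omega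
      by_cases hc : c = '_'
      · rw [show MH_finder.go (k : Int) 0 [] (c :: cs) = MH_finder.go ((k:Int)+1) 0 [] cs from by
          simp [MH_finder.go, hc],
          show ((k:Int)+1) = (((k+1 : Nat)):Int) from by push_cast; ring,
          ih (k+1) (by omega)]
        simp only [pvAltCore, List.splitOn, List.splitOnP_cons, hc, beq_self_eq_true, if_pos,
          List.length_cons]
        by_cases hlen : (cs.splitOnP (fun x => x == '_')).length < 4 - (k+1)
        · rw [if_pos hlen, if_pos (by omega)]
        · rw [if_neg hlen, if_neg (by omega),
            show 3 - k = (3 - (k+1)) + 1 from by omega]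
          simp [List.getD]
      · have h3 : ¬ ((k:Int) = 3 ∧ (0:Int) < 3) := by
          rintro ⟨h, -⟩
          have : k = 3 := by exact_mod_cast h
          omega
        rw [show MH_finder.go (k : Int) 0 [] (c :: cs) = MH_finder.go (k:Int) 0 [] cs from by
          simp only [MH_finder.go]; rw [if_neg hc, if_neg h3], ih k hk]
        have hne := List.splitOnP_ne_nil (fun x => x == '_') cs
        cases h : cs.splitOnP (fun x => x == '_') with
        | nil => exact absurd h hne
        | cons hd tl =>
          simp only [pvAltCore, List.splitOn, List.splitOnP_cons, beq_iff_eq, hc, if_false,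
            h, List.modifyHead, List.length_cons]
          rw [show 3 - k = (2 - k) + 1 from by omega]
          simp [List.getD]

-- ===== VERDICT (by name: the statement is the Claim_ definition above) =====
theorem MH_finder_spec : Claim_equal_MH_finder := by
  intro star _
  unfold Spec_MH_finder MH_finder MH_finder_alt
  have h := pv_main star.toList 0 (by omega)
  norm_num at h
  rw [h]
  simp only [pvAltCore, pvDots]
  split_ifs <;> rfl
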